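-- pv_equiv track=rewrite | github.com/yellalinghmargonda-photon/python | searching/leet_code/count_number.py | evenD
-- ===== SOURCE A (Python) =====
-- def evenD(number: int)->int:
--     count=0
--     if number<0:
--         number=number*(-1)
--     if number==0:
--         return False
--     while number!=0:
--         count+=1
--         number=number//10
--
--     if count%2==0:
--         return True
--     return False
-- ===== SOURCE B (Python) =====
-- def evenD(number: int) -> int:
--     return len(str(abs(number))) % 2 == 0
-- ===== Notes on version B (the rewrite author's own statement) =====
-- stated objective: simpler
-- what changed: Replaces the arithmetic divide-by-ten counting loop (with its sign and zero special cases) by a single expression testing whether the decimal string of the absolute value has even length.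
import Mathlib
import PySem

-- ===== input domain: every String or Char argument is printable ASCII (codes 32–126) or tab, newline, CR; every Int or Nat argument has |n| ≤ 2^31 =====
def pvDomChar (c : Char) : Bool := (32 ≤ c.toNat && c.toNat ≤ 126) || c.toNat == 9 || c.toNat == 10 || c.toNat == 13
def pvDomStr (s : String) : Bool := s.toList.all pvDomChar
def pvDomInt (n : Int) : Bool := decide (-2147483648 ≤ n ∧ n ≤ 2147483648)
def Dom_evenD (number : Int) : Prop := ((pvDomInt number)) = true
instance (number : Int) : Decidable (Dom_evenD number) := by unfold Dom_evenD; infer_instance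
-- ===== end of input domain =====

-- B replaces A's divide-by-10 counting loop by len(str(abs(number))) % 2 == 0 (simpler; same values).

-- ===== PORT A =====
-- the 'while number != 0' loop of A; 0 < n in the guard is only a termination guard
-- (A enters the loop with a positive number: it negates negatives and returns early on 0)
def evenDLoop (n : Int) (count : Int) : Int :=
  if h : 0 < n then
    evenDLoop (PySem.Int.floordiv n 10) (count + 1)
  else count
termination_by n.toNat
decreasing_by
  have h10 : PySem.Int.floordiv n 10 = n / 10 := PySem.Int.floordiv_eq_ediv_of_pos (by omega)
  simp only [h10]
  omega

def evenD (number : Int) : Bool :=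
  let number := if number < 0 then number * (-1) else number
  if number = 0 then false
  else
    let count := evenDLoop number 0
    if PySem.Int.mod count 2 = 0 then true else false

-- ===== PORT B =====
def evenD_alt (number : Int) : Bool :=
  PySem.Int.mod (PySem.Str.len (PySem.Int.toStr |number|)) 2 == 0

-- ===== PRECONDITION & SPEC =====
def Spec_evenD (number : Int) (out : Bool) : Prop := out = evenD_alt number
instance (number : Int) (out : Bool) : Decidable (Spec_evenD number out) := by unfold Spec_evenD; infer_instance

-- ===== CLAIM (what is proved, stated in full; the proofs are below) =====
def Claim_equal_evenD : Prop := ∀ (number : Int), Dom_evenD number → Spec_evenD number (evenD number)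

-- ===== LEMMAS AND PROOFS =====

-- number of decimal digits of m (for m ≥ 1)
def dlen (m : Nat) : Nat :=
  if m < 10 then 1 else dlen (m / 10) + 1
termination_by m
decreasing_by exact Nat.div_lt_self (by omega) (by omega)

lemma toDigitsCore_len : ∀ (f m : Nat) (l : List Char), m < f →
    (Nat.toDigitsCore 10 f m l).length = dlen m + l.length := by
  intro f
  induction f with
  | zero => intro m l h; omega
  | succ f ih =>
    intro m l h
    simp only [Nat.toDigitsCore]
    by_cases h0 : m / 10 = 0
    · have hm : m < 10 := by omega
      simp [h0, dlen, hm]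
      omega
    · have hm : ¬ m < 10 := by omega
      rw [if_neg h0, ih (m / 10) _ (by omega)]
      conv_rhs => rw [dlen]
      rw [if_neg hm]
      simp
      omega

lemma toDigits_len (m : Nat) : (Nat.toDigits 10 m).length = dlen m := by
  have := toDigitsCore_len (m + 1) m [] (by omega)
  simpa [Nat.toDigits] using this

-- A's loop counts exactly dlen digits
lemma evenDLoop_eq : ∀ (k : Nat) (n c : Int), n.toNat ≤ k → 0 < n →
    evenDLoop n c = c + dlen n.toNat := by
  intro k
  induction k with
  | zero => intro n c hk hn; omega
  | succ k ih =>
    intro n c hk hn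
    rw [evenDLoop, dif_pos hn]
    have h10 : PySem.Int.floordiv n 10 = n / 10 := PySem.Int.floordiv_eq_ediv_of_pos (by omega)
    by_cases hsmall : n < 10
    · have hq : PySem.Int.floordiv n 10 = 0 := by rw [h10]; omega
      rw [hq, evenDLoop]
      rw [dif_neg (by omega)]
      rw [dlen]
      have : n.toNat < 10 := by omega
      simp [this]
    · have hqpos : 0 < PySem.Int.floordiv n 10 := by rw [h10]; omega
      rw [ih (PySem.Int.floordiv n 10) (c + 1) (by rw [h10]; omega) hqpos]
      have htn : (PySem.Int.floordiv n 10).toNat = n.toNat / 10 := by rw [h10]; omega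
      rw [htn]
      conv_rhs => rw [dlen]
      have : ¬ n.toNat < 10 := by omega
      simp [this]
      omega

-- B on a positive number computes the parity of dlen too
lemma alt_pos (n : Int) (hn : 0 < n) :
    evenD_alt n = (PySem.Int.mod (dlen n.toNat : Nat) 2 == 0) := by
  have habs : |n| = n := abs_of_pos hn
  have hneg : ¬ n < 0 := by omega
  simp [evenD_alt, habs, PySem.Str.len, PySem.Int.toStr, PySem.Int.toChars, hneg,
    toDigits_len]

-- ===== VERDICT (by name: the statement is the Claim_ definition above) =====
theorem evenD_spec : Claim_equal_evenD := by
  intro number _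
  unfold Spec_evenD
  by_cases h0 : number = 0
  · subst h0
    simp [evenD, evenD_alt, PySem.Str.len, PySem.Int.toStr, PySem.Int.toChars,
      Nat.toDigits, Nat.toDigitsCore, PySem.Int.mod]
  · -- the loop runs on m := |number| > 0
    set m : Int := if number < 0 then number * (-1) else number with hm
    have hmpos : 0 < m := by rw [hm]; split <;> omega
    have habs : |number| = m := by
      rw [hm]; split_ifs with hlt
      · rw [abs_of_neg hlt]; ring
      · exact abs_of_nonneg (by omega)
    have hB : evenD_alt number = evenD_alt m := by
      simp [evenD_alt, habs, abs_of_pos hmpos]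
    rw [hB, alt_pos m hmpos]
    have hloop := evenDLoop_eq m.toNat m 0 (le_refl _) hmpos
    simp only [evenD, ← hm, if_neg (by omega : ¬ m = 0), hloop, zero_add]
    rw [PySem.Int.mod_eq_emod_of_pos (by omega : (0:Int) < 2)]
    by_cases hpar : ((dlen m.toNat : Nat) : Int) % 2 = 0
    · simp [hpar]
    · simp [hpar]
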